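-- pv_equiv track=rewrite | github.com/dong99u/python_codingtest | 배열/모의고사.py | solution
-- ===== SOURCE A (Python) =====
-- from collections import defaultdict
--
-- def solution(answers):
--     students_answers = [
--         [1, 2, 3, 4, 5],
--         [2, 1, 2, 3, 2, 4, 2, 5],
--         [3, 3, 1, 1, 2, 2, 4, 4, 5, 5]
--     ]
--
--     answers_count = defaultdict(int)
--
--     for i in range(3):
--         for j in range(len(answers)):
--             k = j % len(students_answers[i])
--             if students_answers[i][k] == answers[j]:
--                 answers_count[i + 1] += 1
--
--     answer = []
--     max_answer_count = max(answers_count.values())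
--
--     for k, v in answers_count.items():
--         if v == max_answer_count:
--             answer.append(k)
--
--     return answer
-- ===== SOURCE B (Python) =====
-- def solution(answers):
--     patterns = [
--         [1, 2, 3, 4, 5],
--         [2, 1, 2, 3, 2, 4, 2, 5],
--         [3, 3, 1, 1, 2, 2, 4, 4, 5, 5],
--     ]
--     # One histogram pass: count occurrences of each (position mod 40, answer) pair,
--     # 40 being the lcm of the pattern lengths.  Each student's score is then a sum
--     # of 40 histogram lookups, independent of the input length.
--     hist = {}
--     for j, a in enumerate(answers):
--         key = (j % 40, a)
--         hist[key] = hist.get(key, 0) + 1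
--     scores = [sum(hist.get((r, p[r % len(p)]), 0) for r in range(40))
--               for p in patterns]
--     best = max(scores)
--     return [i + 1 for i, s in enumerate(scores) if s == best]
-- ===== Notes on version B (the rewrite author's own statement) =====
-- stated objective: alternative
-- what changed: B builds a histogram of (position mod 40, answer) pairs in one pass (40 = lcm of the pattern lengths) and derives each student's score as a sum of 40 histogram lookups, instead of A's per-student scans comparing every answer against the cycled pattern into a defaultdict; Pre_ excludes inputs with no pattern match anywhere (including the empty list), on which A raises ValueError from max() of an empty sequence.
import Mathlib
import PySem

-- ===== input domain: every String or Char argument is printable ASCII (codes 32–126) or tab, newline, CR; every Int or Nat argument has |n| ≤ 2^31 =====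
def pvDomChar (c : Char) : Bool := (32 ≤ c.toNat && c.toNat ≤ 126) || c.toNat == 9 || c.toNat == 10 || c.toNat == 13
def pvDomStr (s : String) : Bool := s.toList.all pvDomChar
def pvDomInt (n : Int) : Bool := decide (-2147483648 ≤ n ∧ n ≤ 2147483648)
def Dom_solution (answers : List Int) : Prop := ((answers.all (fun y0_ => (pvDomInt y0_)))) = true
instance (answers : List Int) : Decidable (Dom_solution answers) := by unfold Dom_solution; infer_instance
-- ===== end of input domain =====

-- B replaces A's per-student cycled-pattern scans with a single histogram pass over
-- (position mod 40, answer) pairs plus 40 lookups per student; equivalence is proved on Pre_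
-- (inputs with at least one pattern match), outside which the Python A raises ValueError.

-- ===== PORT A =====
-- the three fixed answer patterns (shared literals)
def pvPat1 : List Int := [1, 2, 3, 4, 5]
def pvPat2 : List Int := [2, 1, 2, 3, 2, 4, 2, 5]
def pvPat3 : List Int := [3, 3, 1, 1, 2, 2, 4, 4, 5, 5]

def solution (answers : List Int) : List Int :=
  let students_answers : List (List Int) := [pvPat1, pvPat2, pvPat3]
  let answers_count : PySem.Dict Int Int :=
    (PySem.List.pyRange 0 3 1).foldl (fun d i =>
      (PySem.List.pyRange 0 (answers.length : Int) 1).foldl (fun d j =>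
        let si := (PySem.List.pyGet? students_answers i).getD []
        let k := PySem.Int.mod j (si.length : Int)
        if PySem.List.pyGet? si k = PySem.List.pyGet? answers j then
          d.insert (i + 1) (d.getD (i + 1) 0 + 1)
        else d) d)
      PySem.Dict.empty
  match PySem.List.max? answers_count.values (fun v => v) with
  | none => []   -- Python raises ValueError here (max of empty sequence); excluded by Pre_
  | some m => answers_count.items.foldl (fun ans kv => if kv.2 = m then ans ++ [kv.1] else ans) []

-- ===== PORT B =====
-- the histogram key (j % 40, a)
def pvKey (ja : Int × Int) : Int × Int := (PySem.Int.mod ja.1 40, ja.2)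

def solution_alt (answers : List Int) : List Int :=
  let patterns : List (List Int) := [pvPat1, pvPat2, pvPat3]
  let hist : PySem.Dict (Int × Int) Int :=
    (PySem.List.enumerate answers 0).foldl
      (fun d ja => d.insert (pvKey ja) (d.getD (pvKey ja) 0 + 1)) PySem.Dict.empty
  let scores : List Int := patterns.map (fun p =>
    ((PySem.List.pyRange 0 40 1).map
      (fun r => hist.getD (r, PySem.List.pyGetD p (PySem.Int.mod r (p.length : Int)) 0) 0)).sum)
  let best := (PySem.List.max? scores (fun v => v)).getD 0  -- scores is a 3-element list, max() never raises
  (PySem.List.enumerate scores 0).filterMap (fun ic => if ic.2 = best then some (ic.1 + 1) else none)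

-- ===== PRECONDITION & SPEC =====
-- p[j % len(p)] == a
def pvMatch (p : List Int) (j a : Int) : Bool :=
  decide (PySem.List.pyGet? p (PySem.Int.mod j (p.length : Int)) = some a)

-- Pre_ excludes exactly the inputs with no pattern match at any position (including the empty
-- list), on which the Python A raises ValueError (max() of an empty sequence).
def Pre_solution (answers : List Int) : Prop :=
  ((PySem.List.enumerate answers 0).any
    (fun ja => pvMatch pvPat1 ja.1 ja.2 || pvMatch pvPat2 ja.1 ja.2 || pvMatch pvPat3 ja.1 ja.2)) = true
instance (answers : List Int) : Decidable (Pre_solution answers) := by unfold Pre_solution; infer_instance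
def pvWitness_solution : List Int := [1, 3, 2, 4, 2]

def Spec_solution (answers : List Int) (out : List Int) : Prop := out = solution_alt answers
instance (answers : List Int) (out : List Int) : Decidable (Spec_solution answers out) := by unfold Spec_solution; infer_instance

-- ===== CLAIM (what is proved, stated in full; the proofs are below) =====
def Claim_equal_solution : Prop := ∀ (answers : List Int), Dom_solution answers → Pre_solution answers → Spec_solution answers (solution answers)

-- ===== LEMMAS AND PROOFS =====
-- matches of pattern p per student, counted over the enumerated answers
def pvCnt (p : List Int) (answers : List Int) : Nat :=
  (PySem.List.enumerate answers 0).countP (fun ja => pvMatch p ja.1 ja.2)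

-- generic: counting fold into one dict key (A's inner loop shape)
theorem foldl_dict_count (q : Int × Int → Bool) (l : List (Int × Int)) (key : Int)
    (d : PySem.Dict Int Int) :
    l.foldl (fun d ja => if q ja then d.insert key (d.getD key 0 + 1) else d) d
      = if l.countP q = 0 then d
        else d.insert key (d.getD key 0 + (l.countP q : Int)) := by
  induction l generalizing d with
  | nil => simp
  | cons a t ih =>
    simp only [List.foldl_cons, List.countP_cons]
    by_cases hq : q a
    · simp only [hq, if_pos]
      rw [ih]
      by_cases ht : t.countP q = 0
      · simp [ht]
      · simp only [ht, ite_false]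
        rw [PySem.Dict.insert_insert_self, PySem.Dict.getD_insert_self]
        congr 1
        push_cast [ht]
        ring
    · simp only [hq]
      rw [ih]
      simp

theorem innerA (answers p : List Int) (key : Int) (d : PySem.Dict Int Int) :
    (PySem.List.pyRange 0 (answers.length : Int) 1).foldl (fun d j =>
        if PySem.List.pyGet? p (PySem.Int.mod j (p.length : Int)) = PySem.List.pyGet? answers j
        then d.insert key (d.getD key 0 + 1) else d) d
      = if pvCnt p answers = 0 then d
        else d.insert key (d.getD key 0 + (pvCnt p answers : Int)) := by
  unfold pvCnt
  rw [← foldl_dict_count (fun ja => pvMatch p ja.1 ja.2)]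
  rw [PySem.List.enumerate_eq_map_pyRange (d := 0), List.foldl_map]
  apply PySem.List.foldl_congr_mem
  intro d j hj
  rw [PySem.List.mem_pyRange_one] at hj
  have hj' : j.toNat < answers.length := by omega
  have hg : PySem.List.pyGet? answers j = some (PySem.List.pyGetD answers j 0) := by
    rw [PySem.List.pyGetD_eq_getElem answers 0 hj.1 (by exact_mod_cast hj.2)]
    conv_lhs => rw [show j = (j.toNat : Int) from by omega]
    rw [PySem.List.pyGet?_natCast]
    simp [hj']
  rw [hg]
  simp [pvMatch]

-- sum of an equality indicator over a duplicate-free list containing k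
theorem sum_indicator_nodup (rs : List Int) (hnd : rs.Nodup) (k : Int) (hk : k ∈ rs)
    (g : Int → Int) (v : Int) :
    (rs.map (fun r => if (k, v) = (r, g r) then (1 : Int) else 0)).sum
      = if v = g k then 1 else 0 := by
  induction rs with
  | nil => cases hk
  | cons r t ih =>
    simp only [List.map_cons, List.sum_cons]
    rcases List.mem_cons.mp hk with h | h
    · subst h
      have hnt : k ∉ t := (List.nodup_cons.mp hnd).1
      have hz : (t.map (fun r => if (k, v) = (r, g r) then (1 : Int) else 0)).sum = 0 := by
        apply List.sum_eq_zero
        intro x hx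
        obtain ⟨r, hr, hxe⟩ := List.mem_map.mp hx
        have : ¬ ((k, v) = (r, g r)) := by
          intro he; exact hnt (by cases he; exact hr)
        simp [← hxe, this]
      rw [hz]
      by_cases hv : v = g k <;> simp [hv]
    · have hkr : k ≠ r := by
        rintro rfl; exact (List.nodup_cons.mp hnd).1 h
      have h0 : ¬ ((k, v) = (r, g r)) := by
        simp [Prod.ext_iff, hkr]
      rw [ih (List.nodup_cons.mp hnd).2 h]
      simp [h0]

-- summing histogram lookups over the 40 residues recovers a direct count over the pairs
theorem hist_sum (l : List (Int × Int)) (hl : ∀ ja ∈ l, 0 ≤ ja.1) (f : Int → Int) :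
    ((PySem.List.pyRange 0 40 1).map (fun r => (((l.map pvKey).count (r, f r)) : Int))).sum
      = (l.countP (fun ja => decide (ja.2 = f (PySem.Int.mod ja.1 40))) : Int) := by
  induction l with
  | nil => simp
  | cons a t ih =>
    have hat : ∀ ja ∈ t, (0:Int) ≤ ja.1 := fun ja hja => hl ja (List.mem_cons_of_mem a hja)
    have ha : (0:Int) ≤ a.1 := hl a List.mem_cons_self
    have hsplit : ∀ r : Int, ((((a :: t).map pvKey).count (r, f r)) : Int)
        = ((t.map pvKey).count (r, f r) : Int)
          + (if (PySem.Int.mod a.1 40, a.2) = (r, f r) then (1:Int) else 0) := by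
      intro r
      simp only [List.map_cons, List.count_cons, pvKey]
      split_ifs with h1 h2 h2 <;> simp_all
    have hmap : ((PySem.List.pyRange 0 40 1).map
          (fun r => (((a :: t).map pvKey).count (r, f r) : Int))).sum
        = ((PySem.List.pyRange 0 40 1).map (fun r => ((t.map pvKey).count (r, f r) : Int))).sum
          + ((PySem.List.pyRange 0 40 1).map
              (fun r => if (PySem.Int.mod a.1 40, a.2) = (r, f r) then (1:Int) else 0)).sum := by
      rw [← PySem.List.sum_map_add_int]
      exact congrArg List.sum (List.map_congr_left (fun r _ => hsplit r))
    rw [hmap, ih hat]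
    have hmem : PySem.Int.mod a.1 40 ∈ PySem.List.pyRange 0 40 1 := by
      rw [PySem.List.mem_pyRange_one]
      exact ⟨PySem.Int.mod_nonneg a.1 (by norm_num), PySem.Int.mod_lt a.1 (by norm_num)⟩
    rw [sum_indicator_nodup _ (PySem.List.nodup_pyRange_one 0 40) _ hmem f a.2]
    simp only [List.countP_cons]
    by_cases hv : a.2 = f (PySem.Int.mod a.1 40) <;> simp [hv]

-- B's 40-lookup sum over the histogram counts exactly the matches of pattern p
theorem scoreB (answers p : List Int) (hp : p.length ≠ 0) (hdvd : (p.length : Int) ∣ 40) :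
    ((PySem.List.pyRange 0 40 1).map (fun r =>
        ((((PySem.List.enumerate answers 0).map pvKey).count
          (r, PySem.List.pyGetD p (PySem.Int.mod r (p.length : Int)) 0)) : Int))).sum
      = (pvCnt p answers : Int) := by
  have hL : (0 : Int) < (p.length : Int) := by exact_mod_cast Nat.pos_of_ne_zero hp
  have hl : ∀ ja ∈ PySem.List.enumerate answers 0, (0:Int) ≤ ja.1 := by
    intro ja hja
    obtain ⟨k, hk, rfl⟩ := (PySem.List.mem_enumerate_iff _ _ _).mp hja
    simp
  rw [hist_sum _ hl (fun r => PySem.List.pyGetD p (PySem.Int.mod r (p.length : Int)) 0)]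
  unfold pvCnt
  congr 1
  apply List.countP_congr
  intro ja hja
  obtain ⟨k, hk, rfl⟩ := (PySem.List.mem_enumerate_iff _ _ _).mp hja
  have hj : (0:Int) ≤ (0:Int) + (k:Int) := by positivity
  have hmm : PySem.Int.mod (PySem.Int.mod ((0:Int) + k) 40) (p.length : Int)
      = PySem.Int.mod ((0:Int) + k) (p.length : Int) := by
    rw [PySem.Int.mod_eq_emod_of_pos (show (0:Int) < 40 by norm_num),
        PySem.Int.mod_eq_emod_of_pos hL, PySem.Int.mod_eq_emod_of_pos hL]
    exact Int.emod_emod_of_dvd _ hdvd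
  have hlt : PySem.Int.mod ((0:Int) + k) (p.length : Int) < (p.length : Int) :=
    PySem.Int.mod_lt _ hL
  have hge : (0:Int) ≤ PySem.Int.mod ((0:Int) + k) (p.length : Int) :=
    PySem.Int.mod_nonneg _ hL
  have hg : PySem.List.pyGet? p (PySem.Int.mod ((0:Int) + k) (p.length : Int))
      = some (PySem.List.pyGetD p (PySem.Int.mod ((0:Int) + k) (p.length : Int)) 0) := by
    set i := PySem.Int.mod ((0:Int) + k) (p.length : Int) with hi
    have hi' : i.toNat < p.length := by omega
    rw [PySem.List.pyGetD_eq_getElem p 0 hge (by exact_mod_cast hlt)]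
    conv_lhs => rw [show i = (i.toNat : Int) from by omega]
    rw [PySem.List.pyGet?_natCast]
    simp [hi']
  simp only [hmm, pvMatch, hg]
  simp [eq_comm]

-- A's result after its loops are summarised by the three match counts (proof-only helper)
def pvAres (c1 c2 c3 : Nat) : List Int :=
  let d1 := if c1 = 0 then (PySem.Dict.empty : PySem.Dict Int Int)
            else PySem.Dict.empty.insert (0 + 1) (PySem.Dict.empty.getD (0 + 1) 0 + (c1 : Int))
  let d2 := if c2 = 0 then d1 else d1.insert (1 + 1) (d1.getD (1 + 1) 0 + (c2 : Int))
  let d3 := if c3 = 0 then d2 else d2.insert (2 + 1) (d2.getD (2 + 1) 0 + (c3 : Int))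
  match PySem.List.max? d3.values (fun v => v) with
  | none => []
  | some m => d3.items.foldl (fun ans kv => if kv.2 = m then ans ++ [kv.1] else ans) []

-- B's result after its histogram is summarised by the three match counts (proof-only helper)
def pvBres (c1 c2 c3 : Int) : List Int :=
  (PySem.List.enumerate [c1, c2, c3] 0).filterMap
    (fun ic => if ic.2 = (PySem.List.max? [c1, c2, c3] (fun v => v)).getD 0
               then some (ic.1 + 1) else none)

theorem A_eq (answers : List Int) :
    solution answers
      = pvAres (pvCnt pvPat1 answers) (pvCnt pvPat2 answers) (pvCnt pvPat3 answers) := by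
  unfold solution pvAres
  simp only [show PySem.List.pyRange 0 3 1 = [0, 1, 2] from by decide, List.foldl_cons, List.foldl_nil]
  simp only [show (PySem.List.pyGet? [pvPat1, pvPat2, pvPat3] 0).getD [] = pvPat1 from by decide,
             show (PySem.List.pyGet? [pvPat1, pvPat2, pvPat3] 1).getD [] = pvPat2 from by decide,
             show (PySem.List.pyGet? [pvPat1, pvPat2, pvPat3] 2).getD [] = pvPat3 from by decide]
  simp only [innerA]
  rfl

theorem B_eq (answers : List Int) :
    solution_alt answers
      = pvBres (pvCnt pvPat1 answers) (pvCnt pvPat2 answers) (pvCnt pvPat3 answers) := by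
  unfold solution_alt pvBres
  have hfold : (PySem.List.enumerate answers 0).foldl
      (fun d ja => d.insert (pvKey ja) (d.getD (pvKey ja) 0 + 1))
        (PySem.Dict.empty : PySem.Dict (Int × Int) Int)
      = ((PySem.List.enumerate answers 0).map pvKey).foldl
          (fun d x => d.insert x (d.getD x 0 + 1)) PySem.Dict.empty := by
    rw [List.foldl_map]
  rw [hfold]
  have hgetD : ∀ v : Int × Int,
      (((PySem.List.enumerate answers 0).map pvKey).foldl
        (fun d x => d.insert x (d.getD x 0 + 1)) (PySem.Dict.empty : PySem.Dict (Int × Int) Int)).getD v 0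
      = ((((PySem.List.enumerate answers 0).map pvKey).count v : Int)) := by
    intro v
    rw [PySem.Dict.getD_foldl_insert_add_one]
    simp [PySem.Dict.getD, PySem.Dict.get?, PySem.Dict.empty]
  have hscore : ∀ p : List Int, p.length ≠ 0 → ((p.length : Int) ∣ 40) →
      ((PySem.List.pyRange 0 40 1).map (fun r =>
        (((PySem.List.enumerate answers 0).map pvKey).foldl
          (fun d x => d.insert x (d.getD x 0 + 1)) (PySem.Dict.empty : PySem.Dict (Int × Int) Int)).getD
            (r, PySem.List.pyGetD p (PySem.Int.mod r (p.length : Int)) 0) 0)).sum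
      = (pvCnt p answers : Int) := by
    intro p hp hdvd
    rw [List.map_congr_left
      (fun r _ => hgetD (r, PySem.List.pyGetD p (PySem.Int.mod r (p.length : Int)) 0))]
    exact scoreB answers p hp hdvd
  simp only [List.map_cons, List.map_nil]
  simp only [hscore pvPat1 (by decide) (by decide), hscore pvPat2 (by decide) (by decide),
      hscore pvPat3 (by decide) (by decide)]

-- the closing case analysis over the three (possibly zero) match counts
set_option maxRecDepth 8192 in
theorem finalcase (c1 c2 c3 : Nat) (hne : ¬(c1 = 0 ∧ c2 = 0 ∧ c3 = 0)) :
    pvAres c1 c2 c3 = pvBres (c1 : Int) (c2 : Int) (c3 : Int) := by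
  unfold pvAres pvBres
  by_cases h1 : c1 = 0 <;> by_cases h2 : c2 = 0 <;> by_cases h3 : c3 = 0
  · exact absurd ⟨h1, h2, h3⟩ hne
  all_goals
    simp [h1, h2, h3, PySem.Dict.insert, PySem.Dict.empty, PySem.Dict.getD, PySem.Dict.get?,
      PySem.Dict.values, PySem.List.enumerate_cons, PySem.List.enumerate_nil,
      PySem.List.max?_id_cons]
  all_goals clear hne
  all_goals first
    | omega
    | (simp only [List.filterMap_cons, List.filterMap_nil]
       split_ifs <;> first | rfl | (exfalso; omega))

theorem ports_eq (answers : List Int)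
    (hpre : ((PySem.List.enumerate answers 0).any
      (fun ja => pvMatch pvPat1 ja.1 ja.2 || pvMatch pvPat2 ja.1 ja.2 || pvMatch pvPat3 ja.1 ja.2)) = true) :
    solution answers = solution_alt answers := by
  have hne : ¬(pvCnt pvPat1 answers = 0 ∧ pvCnt pvPat2 answers = 0 ∧ pvCnt pvPat3 answers = 0) := by
    rintro ⟨h1, h2, h3⟩
    rw [List.any_eq_true] at hpre
    obtain ⟨ja, hmem, hq⟩ := hpre
    unfold pvCnt at h1 h2 h3
    rw [List.countP_eq_zero] at h1 h2 h3
    have := h1 ja hmem; have := h2 ja hmem; have := h3 ja hmem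
    simp_all
  rw [A_eq, B_eq]
  exact finalcase _ _ _ hne

-- ===== VERDICT (by name: the statement is the Claim_ definition above) =====
theorem solution_spec : Claim_equal_solution := by
  intro answers _ hpre
  unfold Spec_solution
  exact ports_eq answers hpre
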